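-- pv_equiv track=rewrite | github.com/MatsJSvensson/AdventOfCode | 2024/Day21.py | keypad_translator
-- ===== SOURCE A (Python) =====
-- keypad = {'': [0, 0],
--           '^': [1, 0],
--           'A': [2, 0],
--           '<': [0, 1],
--           'v': [1, 1],
--           '>': [2, 1]}
--
-- def keypad_translator(start, code, save, memo_map):
--     if code in memo_map.keys():
--         return memo_map[code]
--     char = code[0]
--     pos = keypad[char]
--     x = pos[0] - start[0]
--     y = pos[1] - start[1]
--     new_code = ''
--     if x < 0:
--         new_code += '<' * abs(x)
--     if y > 0:
--         new_code += 'v' * y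
--     if x > 0:
--         new_code += '>' * x
--     if y < 0:
--         new_code += '^' * abs(y)
--
--     new_code += 'A'
--
--     if len(code) > 1:
--         new_code += keypad_translator(pos, code[1:], False, memo_map)
--     if save:
--         memo_map[code] = new_code
--     return new_code
-- ===== SOURCE B (Python) =====
-- keypad = {'': [0, 0],
--           '^': [1, 0],
--           'A': [2, 0],
--           '<': [0, 1],
--           'v': [1, 1],
--           '>': [2, 1]}
--
-- def keypad_translator(start, code, save, memo_map):
--     # Iterative version: one loop over the characters with a running position,
--     # consulting the memo at every proper suffix (as the recursion does) and
--     # saving only the full top-level code.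
--     if code in memo_map.keys():
--         return memo_map[code]
--     result = ''
--     cur = start
--     for i in range(len(code)):
--         if i > 0 and code[i:] in memo_map.keys():
--             result += memo_map[code[i:]]
--             break
--         pos = keypad[code[i]]
--         x = pos[0] - cur[0]
--         y = pos[1] - cur[1]
--         result += '<' * max(-x, 0) + 'v' * max(y, 0) + '>' * max(x, 0) + '^' * max(-y, 0) + 'A'
--         cur = pos
--     if save:
--         memo_map[code] = result
--     return result
-- ===== Notes on version B (the rewrite author's own statement) =====
-- stated objective: alternative
-- what changed: Replaced the suffix recursion by a single iterative loop over the characters with a running position and accumulator (memo consulted at each proper suffix, saved only for the full code), and the four conditional string appends by one max()-based concatenation.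
import Mathlib
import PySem

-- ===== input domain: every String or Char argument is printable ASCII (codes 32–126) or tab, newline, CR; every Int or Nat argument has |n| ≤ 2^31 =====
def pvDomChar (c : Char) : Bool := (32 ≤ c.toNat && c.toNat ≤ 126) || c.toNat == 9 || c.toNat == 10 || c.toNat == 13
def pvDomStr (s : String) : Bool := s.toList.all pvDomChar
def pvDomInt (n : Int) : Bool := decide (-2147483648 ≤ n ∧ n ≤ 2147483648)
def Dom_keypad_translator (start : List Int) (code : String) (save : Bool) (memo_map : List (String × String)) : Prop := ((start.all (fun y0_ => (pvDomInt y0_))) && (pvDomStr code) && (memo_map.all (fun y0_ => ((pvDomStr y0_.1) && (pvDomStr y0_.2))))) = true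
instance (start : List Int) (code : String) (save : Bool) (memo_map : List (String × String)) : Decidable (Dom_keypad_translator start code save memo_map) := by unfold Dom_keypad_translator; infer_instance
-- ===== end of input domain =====

-- B replaces A's suffix recursion by one iterative loop with an accumulator; equivalence is about
-- the RETURN value only (when save is true both Pythons also store memo_map[code], not modeled here).

-- shared context: the `keypad` dict as a per-character lookup (the '' key is unreachable from code[i])
def ktLook (c : Char) : Option (Int × Int) :=
  if c = '^' then some (1, 0)
  else if c = 'A' then some (2, 0)
  else if c = '<' then some (0, 1)
  else if c = 'v' then some (1, 1)
  else if c = '>' then some (2, 1)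
  else none

-- dict membership/lookup: first match in the association list
def memoGet (m : List (String × String)) (k : String) : Option String :=
  match m with
  | [] => none
  | (k', v) :: rest => if k' = k then some v else memoGet rest k

-- ===== PORT A =====
-- A's recursion on the suffix; the Python IndexError (empty code) / KeyError (char not on the
-- keypad) cases return [] here and are excluded by Pre_.
def ktA (sx sy : Int) (code : List Char) (memo : List (String × String)) : List Char :=
  match memoGet memo (String.ofList code) with
  | some v => v.toList
  | none =>
    match code with
    | [] => []  -- Python: IndexError at code[0]
    | c :: rest =>
      match ktLook c with
      | none => []  -- Python: KeyError at keypad[char]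
      | some (px, py) =>
        let x := px - sx
        let y := py - sy
        let new_code :=
          (if x < 0 then List.replicate (-x).toNat '<' else []) ++
          (if y > 0 then List.replicate y.toNat 'v' else []) ++
          (if x > 0 then List.replicate x.toNat '>' else []) ++
          (if y < 0 then List.replicate (-y).toNat '^' else []) ++ ['A']
        new_code ++ (if rest ≠ [] then ktA px py rest memo else [])

-- start[0]/start[1]: pyGet? is Python indexing; `.getD 0` totalizes the IndexError case, which Pre_ excludes
def keypad_translator (start : List Int) (code : String) (save : Bool) (memo_map : List (String × String)) : String :=
  String.ofList (ktA ((PySem.List.pyGet? start 0).getD 0) ((PySem.List.pyGet? start 1).getD 0) code.toList memo_map)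

-- ===== PORT B =====
-- B's loop: index i becomes the suffix `cs`, `first` is `i > 0` negated, `acc` is `result`
def ktB (memo : List (String × String)) (cur : Int × Int) (cs : List Char) (first : Bool) (acc : List Char) : List Char :=
  match cs with
  | [] => acc
  | c :: rest =>
    if first = false ∧ (memoGet memo (String.ofList (c :: rest))).isSome then
      acc ++ ((memoGet memo (String.ofList (c :: rest))).getD "").toList  -- result += memo[code[i:]]; break
    else
      match ktLook c with
      | none => acc  -- Python: KeyError; excluded by Pre_
      | some (px, py) =>
        let x := px - cur.1
        let y := py - cur.2
        ktB memo (px, py) rest false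
          (acc ++ List.replicate (max (-x) 0).toNat '<' ++ List.replicate (max y 0).toNat 'v' ++
                 List.replicate (max x 0).toNat '>' ++ List.replicate (max (-y) 0).toNat '^' ++ ['A'])

def keypad_translator_alt (start : List Int) (code : String) (save : Bool) (memo_map : List (String × String)) : String :=
  match memoGet memo_map code with
  | some v => v
  | none =>
    String.ofList (ktB memo_map ((PySem.List.pyGet? start 0).getD 0, (PySem.List.pyGet? start 1).getD 0)
                 code.toList true [])

-- ===== PRECONDITION & SPEC =====
-- each suffix of the code is either memoized or starts with a keypad character
def ktOk (memo : List (String × String)) : List Char → Bool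
  | [] => false
  | c :: rest =>
    (memoGet memo (String.ofList (c :: rest))).isSome ||
      ((ktLook c).isSome && (decide (rest = []) || ktOk memo rest))

-- Pre_ excludes exactly the inputs where A raises: an empty code not in the memo (IndexError),
-- a start list shorter than 2 when the code is not memoized (IndexError), and codes containing a
-- non-keypad character before any memoized suffix (KeyError).
def Pre_keypad_translator (start : List Int) (code : String) (save : Bool) (memo_map : List (String × String)) : Prop :=
  (memoGet memo_map code).isSome = true ∨ (2 ≤ start.length ∧ ktOk memo_map code.toList = true)

instance (start : List Int) (code : String) (save : Bool) (memo_map : List (String × String)) : Decidable (Pre_keypad_translator start code save memo_map) := by unfold Pre_keypad_translator; infer_instance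

def pvWitness_keypad_translator : List Int × String × Bool × (List (String × String)) :=
  ([2, 0], "^<A", true, [("<A", ">>vA")])

def Spec_keypad_translator (start : List Int) (code : String) (save : Bool) (memo_map : List (String × String)) (out : String) : Prop := out = keypad_translator_alt start code save memo_map
instance (start : List Int) (code : String) (save : Bool) (memo_map : List (String × String)) (out : String) : Decidable (Spec_keypad_translator start code save memo_map out) := by unfold Spec_keypad_translator; infer_instance

-- ===== CLAIM (what is proved, stated in full; the proofs are below) =====
def Claim_equal_keypad_translator : Prop := ∀ (start : List Int) (code : String) (save : Bool) (memo_map : List (String × String)), Dom_keypad_translator start code save memo_map → Pre_keypad_translator start code save memo_map → Spec_keypad_translator start code save memo_map (keypad_translator start code save memo_map)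

-- ===== LEMMAS AND PROOFS =====

-- B's max-based burst of repeated characters equals A's conditional one
lemma repl_lt (u v : Int) (a : Char) :
    List.replicate (max (u - v) 0).toNat a = (if v < u then List.replicate (u - v).toNat a else []) := by
  split_ifs with h
  · have : max (u - v) 0 = u - v := by omega
    rw [this]
  · have : max (u - v) 0 = 0 := by omega
    simp [this]

-- core invariant: on valid non-first suffixes, B's loop appends exactly A's recursion result
lemma ktB_eq_ktA (memo : List (String × String)) :
    ∀ (cs : List Char) (cur : Int × Int) (acc : List Char), ktOk memo cs = true →
      ktB memo cur cs false acc = acc ++ ktA cur.1 cur.2 cs memo := by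
  intro cs
  induction cs with
  | nil => intro cur acc h; simp [ktOk] at h
  | cons c rest ih =>
    intro cur acc h
    cases hm : memoGet memo (String.ofList (c :: rest)) with
    | some v =>
      simp [ktB, ktA, hm]
    | none =>
      rw [ktOk] at h
      rw [hm] at h
      simp only [Option.isSome_none, Bool.false_or, Bool.and_eq_true, Bool.or_eq_true,
        decide_eq_true_eq] at h
      obtain ⟨h1, hrest⟩ := h
      cases hp : ktLook c with
      | none => rw [hp] at h1; simp at h1
      | some p =>
      obtain ⟨px, py⟩ := p
      rw [ktB, ktA.eq_def, hm]
      simp only [Option.isSome_none, Bool.false_eq_true, and_false, if_false, hp]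
      rcases hrest with hnil | hok
      · subst hnil
        simp [ktB, repl_lt, List.append_assoc]
      · have hne : rest ≠ [] := by
          intro hc; rw [hc] at hok; simp [ktOk] at hok
        rw [ih (px, py) _ hok]
        simp [hne, repl_lt, List.append_assoc]

-- top-level step: the first loop iteration skips the memo check that A already did
lemma ktB_top_eq_ktA (memo : List (String × String)) (cs : List Char) (cur : Int × Int)
    (hm : memoGet memo (String.ofList cs) = none) (h : ktOk memo cs = true) :
    ktB memo cur cs true [] = ktA cur.1 cur.2 cs memo := by
  cases cs with
  | nil => simp [ktOk] at h
  | cons c rest =>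
    rw [ktOk] at h
    rw [hm] at h
    simp only [Option.isSome_none, Bool.false_or, Bool.and_eq_true, Bool.or_eq_true,
      decide_eq_true_eq] at h
    obtain ⟨h1, hrest⟩ := h
    cases hp : ktLook c with
    | none => rw [hp] at h1; simp at h1
    | some p =>
    obtain ⟨px, py⟩ := p
    rw [ktB, ktA.eq_def, hm]
    simp only [Bool.true_eq_false, false_and, if_false, hp]
    rcases hrest with hnil | hok
    · subst hnil
      simp [ktB, repl_lt, List.append_assoc]
    · have hne : rest ≠ [] := by
        intro hc; rw [hc] at hok; simp [ktOk] at hok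
      rw [ktB_eq_ktA memo rest (px, py) _ hok]
      simp [hne, repl_lt, List.append_assoc]

-- ===== VERDICT (by name: the statement is the Claim_ definition above) =====
theorem keypad_translator_spec : Claim_equal_keypad_translator := by
  intro start code save memo_map _dom hpre
  unfold Spec_keypad_translator keypad_translator keypad_translator_alt
  have hck : String.ofList code.toList = code := String.ofList_toList
  cases hm : memoGet memo_map code with
  | some v =>
    rw [ktA.eq_def]
    rw [hck, hm]
    cases code.toList <;> simp
  | none =>
    rcases hpre with hmem | ⟨_hlen, hok⟩
    · rw [hm] at hmem; simp at hmem
    · have hm' : memoGet memo_map (String.ofList code.toList) = none := by rw [hck]; exact hm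
      rw [ktB_top_eq_ktA memo_map code.toList _ hm' hok]
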